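-- pv_equiv track=rewrite | github.com/Vineeth0102/Accenture | This Year/Aug 16,2024 Slot-1/pro2.py | PermuationCount
-- ===== SOURCE A (Python) =====
-- def PermuationCount(String :str)->int:
--     String = String.lower()
--     res,val = 1,1
--     for i in String :
--         if not (i == 'a' or i == 'e' or i == 'i' or i == 'o' or i == 'u' ):
--             res *= val
--             val+=1
--     return res
-- ===== SOURCE B (Python) =====
-- import math
--
-- def PermuationCount(String: str) -> int:
--     n = sum(1 for c in String.lower() if c not in 'aeiou')
--     return math.factorial(n)
-- ===== Notes on version B (the rewrite author's own statement) =====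
-- stated objective: simpler
-- what changed: Replaced A's fused count-and-multiply loop maintaining two accumulators (res, val) with a single counting pass over the lowered string followed by one math.factorial call.
import Mathlib
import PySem

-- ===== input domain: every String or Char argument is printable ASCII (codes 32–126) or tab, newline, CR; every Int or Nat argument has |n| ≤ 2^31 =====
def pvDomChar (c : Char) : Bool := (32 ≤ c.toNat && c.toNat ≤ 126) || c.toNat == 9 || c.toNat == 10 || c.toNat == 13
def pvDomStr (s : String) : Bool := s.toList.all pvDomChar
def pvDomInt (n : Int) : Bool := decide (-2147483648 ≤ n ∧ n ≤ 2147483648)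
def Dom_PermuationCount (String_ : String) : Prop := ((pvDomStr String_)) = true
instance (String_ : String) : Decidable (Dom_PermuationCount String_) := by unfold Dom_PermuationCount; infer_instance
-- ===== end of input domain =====

-- B separates counting from computing: one counting pass, then one factorial; same value as A's fused loop.

-- ===== PORT A =====
-- A's loop body: if i is not a vowel, res *= val; val += 1, carried as the pair (res, val).
def pvStepA (st : Int × Int) (i : Char) : Int × Int :=
  if ¬ (i = 'a' ∨ i = 'e' ∨ i = 'i' ∨ i = 'o' ∨ i = 'u') then (st.1 * st.2, st.2 + 1) else st

def PermuationCount (String_ : String) : Int :=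
  ((PySem.Str.lower String_).toList.foldl pvStepA (1, 1)).1

-- ===== PORT B =====
-- Source B: n = sum(1 for c in String.lower() if c not in 'aeiou'); return math.factorial(n)
def PermuationCount_alt (String_ : String) : Int :=
  let n := ((PySem.Str.lower String_).toList.filter (fun c => ¬ ("aeiou".toList.contains c))).length
  (Nat.factorial n : Int)

-- ===== PRECONDITION & SPEC =====
def Spec_PermuationCount (String_ : String) (out : Int) : Prop := out = PermuationCount_alt String_
instance (String_ : String) (out : Int) : Decidable (Spec_PermuationCount String_ out) := by unfold Spec_PermuationCount; infer_instance

-- ===== CLAIM (what is proved, stated in full; the proofs are below) =====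
def Claim_equal_PermuationCount : Prop := ∀ (String_ : String), Dom_PermuationCount String_ → Spec_PermuationCount String_ (PermuationCount String_)

-- ===== LEMMAS AND PROOFS =====

-- the two non-vowel tests agree
theorem pvCons_iff (c : Char) :
    (¬ ("aeiou".toList.contains c)) ↔ ¬ (c = 'a' ∨ c = 'e' ∨ c = 'i' ∨ c = 'o' ∨ c = 'u') := by
  rw [show "aeiou".toList = ['a', 'e', 'i', 'o', 'u'] from rfl]
  simp [List.contains_eq_mem]

-- loop invariant: starting from (k!, k+1), the fold ends at ((k+cnt)!, k+cnt+1)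
theorem pvFoldA (cs : List Char) (k : ℕ) :
    cs.foldl pvStepA ((Nat.factorial k : Int), (k : Int) + 1)
      = ((Nat.factorial (k + (cs.filter (fun c => ¬ ("aeiou".toList.contains c))).length) : Int),
         ((k : Int) + (cs.filter (fun c => ¬ ("aeiou".toList.contains c))).length + 1)) := by
  induction cs generalizing k with
  | nil => simp
  | cons c cs ih =>
    by_cases h : (¬ ("aeiou".toList.contains c))
    · have h' := (pvCons_iff c).mp h
      simp only [List.foldl_cons, pvStepA, if_pos h', List.filter_cons, h]
      have : ((Nat.factorial k : Int) * ((k : Int) + 1), (k : Int) + 1 + 1)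
          = ((Nat.factorial (k + 1) : Int), ((k + 1 : ℕ) : Int) + 1) := by
        simp [Nat.factorial_succ]; ring
      rw [this, ih (k + 1)]
      simp
      constructor
      · ring_nf
      · ring
    · have h' : ¬ ¬ (c = 'a' ∨ c = 'e' ∨ c = 'i' ∨ c = 'o' ∨ c = 'u') := by
        intro hc; exact h ((pvCons_iff c).mpr hc)
      simp only [List.foldl_cons, pvStepA, if_neg h', List.filter_cons, h]
      simpa using ih k

-- ===== VERDICT (by name: the statement is the Claim_ definition above) =====
theorem PermuationCount_spec : Claim_equal_PermuationCount := by
  intro s _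
  unfold Spec_PermuationCount PermuationCount PermuationCount_alt
  have h := pvFoldA (PySem.Str.lower s).toList 0
  simp at h
  simp [h]
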